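-- pv_equiv track=rewrite | github.com/skinterqwe/ML-Systems-Textbook-CN | scripts/check_translation_syntax.py | check_tikz_closing_glued
-- ===== SOURCE A (Python) =====
-- from typing import List, Tuple
--
-- def check_tikz_closing_glued(lines: List[str]) -> List[Tuple[int, str, str]]:
--     """Detect ``` closing markers glued to non-blank content in TikZ blocks."""
--     issues = []
--     in_code = False
--     code_lang = ""
--     for i, line in enumerate(lines, 1):
--         stripped = line.rstrip("\n")
--         if stripped.startswith("```"):
--             if in_code:
--                 # Closing code block — check for glued content
--                 rest = stripped[3:].strip()
--                 if rest:
--                     # ``` followed by non-whitespace = glued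
--                     issues.append((i, "tikz-closing-glued", stripped.strip()))
--                 in_code = False
--                 code_lang = ""
--             else:
--                 # Opening code block
--                 lang = stripped[3:].strip().lower()
--                 in_code = True
--                 code_lang = lang
--             continue
--
--     return issues
-- ===== SOURCE B (Python) =====
-- def check_tikz_closing_glued(lines):
--     """Detect ``` closing markers glued to non-blank content in TikZ blocks."""
--     stripped = [line.rstrip("\n") for line in lines]
--     issues = []
--     for j, s in enumerate(stripped):
--         if s.startswith("```"):
--             k = sum(1 for t in stripped[:j + 1] if t.startswith("```"))
--             if k % 2 == 0 and s[3:].strip():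
--                 issues.append((j + 1, "tikz-closing-glued", s.strip()))
--     return issues
-- ===== Notes on version B (the rewrite author's own statement) =====
-- stated objective: alternative
-- what changed: B drops A's threaded in_code/code_lang loop state entirely: it first strips every line, then classifies each fence line independently and statelessly by re-counting the fence lines up to it (a closing fence iff that count is even), trading A's O(n) single pass with mutable state for stateless nested scans.
import Mathlib
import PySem

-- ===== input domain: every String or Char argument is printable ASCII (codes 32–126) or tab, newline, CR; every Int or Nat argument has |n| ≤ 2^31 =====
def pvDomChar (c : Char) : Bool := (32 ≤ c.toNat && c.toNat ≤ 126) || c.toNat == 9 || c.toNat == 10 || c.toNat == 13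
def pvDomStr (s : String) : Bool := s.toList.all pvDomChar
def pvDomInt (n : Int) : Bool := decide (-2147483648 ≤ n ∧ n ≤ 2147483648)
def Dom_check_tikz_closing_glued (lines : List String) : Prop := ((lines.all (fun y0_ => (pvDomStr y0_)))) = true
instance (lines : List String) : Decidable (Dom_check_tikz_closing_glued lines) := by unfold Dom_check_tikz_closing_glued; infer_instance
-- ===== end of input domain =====

-- B replaces A's threaded in_code/code_lang loop state by a stateless per-line rule:
-- a fence line is a closing fence iff the count of fence lines up to and including it is
-- even (re-counted by a nested scan); objective: alternative (stateless nested scans).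

-- exact port of Python's line.rstrip("\n"): drop trailing '\n' characters (used by both sources)
def pvRstripNL (s : String) : String := String.ofList ((s.toList.reverse.dropWhile (· == '\n')).reverse)

-- ===== PORT A =====
-- one iteration of A's loop; state = (issues, in_code, code_lang), exactly A's loop state
def pvStepA (st : List (Int × String × String) × Bool × String) (p : Int × String) :
    List (Int × String × String) × Bool × String :=
  let stripped := pvRstripNL p.2
  if PySem.Str.startswith stripped "```" then
    if st.2.1 then
      -- closing code block — check for glued content
      let rest := PySem.Str.strip (PySem.Str.slice stripped (some 3) none)
      (if rest = "" then st.1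
       else st.1 ++ [(p.1, "tikz-closing-glued", PySem.Str.strip stripped)],
       false, "")
    else
      -- opening code block
      (st.1, true, PySem.Str.lower (PySem.Str.strip (PySem.Str.slice stripped (some 3) none)))
  else st

def check_tikz_closing_glued (lines : List String) : List (Int × String × String) :=
  ((PySem.List.enumerate lines 1).foldl pvStepA ([], false, "")).1

-- ===== PORT B =====
-- s.startswith("```")
def pvIsFence (s : String) : Bool := PySem.Str.startswith s "```"

-- B's loop body: for the 0-based line j with stripped text s, re-count the fence lines in
-- stripped[:j+1] (Python's sum(1 for …) of a 0/1 generator = countP; k ≥ 0 so Nat % = Python %)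
def pvStepB (stripped : List String) (acc : List (Int × String × String)) (p : Int × String) :
    List (Int × String × String) :=
  if pvIsFence p.2 then
    let k := (PySem.List.slice stripped none (some (p.1 + 1))).countP pvIsFence
    if k % 2 = 0 ∧ PySem.Str.strip (PySem.Str.slice p.2 (some 3) none) ≠ ""
    then acc ++ [(p.1 + 1, "tikz-closing-glued", PySem.Str.strip p.2)]
    else acc
  else acc

def check_tikz_closing_glued_alt (lines : List String) : List (Int × String × String) :=
  let stripped := lines.map pvRstripNL
  (PySem.List.enumerate stripped 0).foldl (pvStepB stripped) []

-- ===== PRECONDITION & SPEC =====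
def Spec_check_tikz_closing_glued (lines : List String) (out : List (Int × String × String)) : Prop := out = check_tikz_closing_glued_alt lines
instance (lines : List String) (out : List (Int × String × String)) : Decidable (Spec_check_tikz_closing_glued lines out) := by unfold Spec_check_tikz_closing_glued; infer_instance

-- ===== CLAIM (what is proved, stated in full; the proofs are below) =====
def Claim_equal_check_tikz_closing_glued : Prop := ∀ (lines : List String), Dom_check_tikz_closing_glued lines → Spec_check_tikz_closing_glued lines (check_tikz_closing_glued lines)

-- ===== LEMMAS AND PROOFS =====

-- the fence lines of the already-stripped list ss, numbered from n
def pvFences (ss : List String) (n : Int) : List (Int × String) :=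
  match ss with
  | [] => []
  | s :: rest =>
    if pvIsFence s then (n, s) :: pvFences rest (n + 1) else pvFences rest (n + 1)

-- the issues produced from a fence list when the current parity flag is b (b = inside a code block)
def pvGlue (b : Bool) (fs : List (Int × String)) : List (Int × String × String) :=
  match fs with
  | [] => []
  | (i, s) :: rest =>
    if b then
      (if PySem.Str.strip (PySem.Str.slice s (some 3) none) = "" then pvGlue false rest
       else (i, "tikz-closing-glued", PySem.Str.strip s) :: pvGlue false rest)
    else pvGlue true rest

theorem pvFoldA_eq (lines : List String) (n : Int)
    (acc : List (Int × String × String)) (b : Bool) (lang : String) :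
    ((PySem.List.enumerate lines n).foldl pvStepA (acc, b, lang)).1
    = acc ++ pvGlue b (pvFences (lines.map pvRstripNL) n) := by
  induction lines generalizing n acc b lang with
  | nil =>
    cases b <;> rw [PySem.List.enumerate_nil, List.foldl_nil, List.map_nil, pvFences, pvGlue,
      List.append_nil]
  | cons l rest ih =>
    rw [PySem.List.enumerate_cons, List.foldl_cons, List.map_cons]
    by_cases hs : pvIsFence (pvRstripNL l) = true
    · have hs' : PySem.Str.startswith (pvRstripNL l) "```" = true := hs
      cases b with
      | false =>
        have h1 : pvStepA (acc, false, lang) (n, l) =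
            (acc, true, PySem.Str.lower (PySem.Str.strip (PySem.Str.slice (pvRstripNL l) (some 3) none))) := by
          unfold pvStepA; rw [if_pos hs']; rfl
        rw [h1, ih, pvFences, if_pos hs, pvGlue]
        simp
      | true =>
        by_cases hr : PySem.Str.strip (PySem.Str.slice (pvRstripNL l) (some 3) none) = ""
        · have h1 : pvStepA (acc, true, lang) (n, l) = (acc, false, "") := by
            unfold pvStepA; rw [if_pos hs']; simp [hr]
          rw [h1, ih, pvFences, if_pos hs, pvGlue, if_pos hr]
          simp
        · have h1 : pvStepA (acc, true, lang) (n, l) =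
              (acc ++ [(n, "tikz-closing-glued", PySem.Str.strip (pvRstripNL l))], false, "") := by
            unfold pvStepA; rw [if_pos hs']; simp [hr]
          rw [h1, ih, pvFences, if_pos hs, pvGlue, if_neg hr]
          simp
    · have hs' : ¬ PySem.Str.startswith (pvRstripNL l) "```" = true := hs
      have h1 : pvStepA (acc, b, lang) (n, l) = (acc, b, lang) := by
        unfold pvStepA; rw [if_neg hs']
      rw [h1, ih, pvFences, if_neg hs]

theorem pvFoldB_eq (stripped pre rest : List String) (h : stripped = pre ++ rest)
    (acc : List (Int × String × String)) :
    (PySem.List.enumerate rest (pre.length : Int)).foldl (pvStepB stripped) acc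
    = acc ++ pvGlue (decide (pre.countP pvIsFence % 2 = 1)) (pvFences rest ((pre.length : Int) + 1)) := by
  induction rest generalizing pre acc with
  | nil =>
    cases hb : decide (pre.countP pvIsFence % 2 = 1) <;>
      rw [PySem.List.enumerate_nil, List.foldl_nil, pvFences, pvGlue, List.append_nil]
  | cons s rest' ih =>
    have htake : PySem.List.slice stripped none (some ((pre.length : Int) + 1))
        = pre ++ [s] := by
      have hcast : ((pre.length : Int) + 1) = ((pre.length + 1 : Nat) : Int) := by push_cast; ring
      rw [hcast, PySem.List.slice_to_natCast, h, List.take_append,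
        List.take_of_length_le (by omega), Nat.add_sub_cancel_left]
      simp
    have h2 := ih (pre ++ [s]) (by rw [h]; simp)
    have hlen : ((pre ++ [s]).length : Int) = (pre.length : Int) + 1 := by simp
    rw [hlen] at h2
    rw [PySem.List.enumerate_cons, List.foldl_cons]
    by_cases hs : pvIsFence s = true
    · have hcnt : (pre ++ [s]).countP pvIsFence = pre.countP pvIsFence + 1 := by
        rw [List.countP_append]; simp [hs]
      rw [hcnt] at h2
      by_cases hp : pre.countP pvIsFence % 2 = 1
      · -- previous fence count odd: this fence closes a block (its own count is even)
        have hk : (pre.countP pvIsFence + 1) % 2 = 0 := by omega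
        have hb1 : decide (pre.countP pvIsFence % 2 = 1) = true := by simp [hp]
        have hb2 : decide ((pre.countP pvIsFence + 1) % 2 = 1) = false := by
          simp only [decide_eq_false_iff_not]; omega
        by_cases hr : PySem.Str.strip (PySem.Str.slice s (some 3) none) = ""
        · have h1 : pvStepB stripped acc ((pre.length : Int), s) = acc := by
            simp only [pvStepB, hs, if_true, htake, hcnt]
            rw [if_neg (fun hcon => hcon.2 hr)]
          rw [h1, h2, pvFences, if_pos hs, pvGlue, hb1, hb2]
          simp [hr]
        · have h1 : pvStepB stripped acc ((pre.length : Int), s)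
              = acc ++ [((pre.length : Int) + 1, "tikz-closing-glued", PySem.Str.strip s)] := by
            simp only [pvStepB, hs, if_true, htake, hcnt]
            rw [if_pos ⟨hk, hr⟩]
          rw [h1, h2, pvFences, if_pos hs, pvGlue, hb1, hb2]
          simp [hr]
      · -- previous fence count even: this fence opens a block (its own count is odd)
        have hb1 : decide (pre.countP pvIsFence % 2 = 1) = false := by simp [hp]
        have hb2 : decide ((pre.countP pvIsFence + 1) % 2 = 1) = true := by
          simp only [decide_eq_true_eq]; omega
        have h1 : pvStepB stripped acc ((pre.length : Int), s) = acc := by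
          simp only [pvStepB, hs, if_true, htake, hcnt]
          rw [if_neg (fun hcon => hp (by omega : pre.countP pvIsFence % 2 = 1))]
        rw [h1, h2, pvFences, if_pos hs, pvGlue, hb1, hb2]
        simp
    · have hcnt : (pre ++ [s]).countP pvIsFence = pre.countP pvIsFence := by
        rw [List.countP_append]; simp [hs]
      rw [hcnt] at h2
      have h1 : pvStepB stripped acc ((pre.length : Int), s) = acc := by
        simp [pvStepB, hs]
      rw [h1, h2, pvFences, if_neg hs]

-- ===== VERDICT (by name: the statement is the Claim_ definition above) =====
theorem check_tikz_closing_glued_spec : Claim_equal_check_tikz_closing_glued := by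
  intro lines _
  show check_tikz_closing_glued lines = check_tikz_closing_glued_alt lines
  unfold check_tikz_closing_glued check_tikz_closing_glued_alt
  have hA := pvFoldA_eq lines 1 [] false ""
  have hB := pvFoldB_eq (lines.map pvRstripNL) [] (lines.map pvRstripNL) (by simp) []
  simp only [List.length_nil, Nat.cast_zero, List.countP_nil] at hB
  rw [hA, hB]
  norm_num
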